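-- pv_equiv track=rewrite | github.com/career-prep/ucp-namer-latam-2026 | ngaatendwe_dumbarimwe/q4_FirstkBinaryNumbers.py | first_k_binary
-- ===== SOURCE A (Python) =====
-- from collections import deque
--
-- def first_k_binary(k):
--     if k <= 0:
--         return []
--
--     result = ["0"]  # start with 0
--     queue = deque(["1"])  # start generating from 1
--
--     while len(result) < k:
--         curr = queue.popleft()
--         result.append(curr)
--
--         queue.append(curr + "0")
--         queue.append(curr + "1")
--
--     return result
-- ===== SOURCE B (Python) =====
-- def first_k_binary(k):
--     # Each emitted string is just the binary representation of its index:
--     # the BFS queue enumerates bin(1),bin(2),... so compute each directly.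
--     return [bin(i)[2:] for i in range(k)]
-- ===== Notes on version B (the rewrite author's own statement) =====
-- stated objective: idiomatic
-- what changed: Replaced the BFS deque that grows strings by appending bits with a direct per-index closed form bin(i)[2:] over range(k), maintaining no queue or result accumulator.
import Mathlib
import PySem

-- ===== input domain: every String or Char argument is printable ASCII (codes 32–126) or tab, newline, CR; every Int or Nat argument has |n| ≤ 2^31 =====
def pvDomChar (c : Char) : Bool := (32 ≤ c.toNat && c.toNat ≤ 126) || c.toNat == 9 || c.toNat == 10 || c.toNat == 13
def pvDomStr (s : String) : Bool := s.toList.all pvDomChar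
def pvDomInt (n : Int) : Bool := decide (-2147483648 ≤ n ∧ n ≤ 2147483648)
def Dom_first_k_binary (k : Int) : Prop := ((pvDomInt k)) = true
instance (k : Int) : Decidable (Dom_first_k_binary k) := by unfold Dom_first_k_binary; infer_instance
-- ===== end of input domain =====

-- B replaces A's BFS deque of growing strings with the per-index closed form bin(i)[2:] over range(k).

-- ===== PORT A =====
-- Python 'a + b' on strings, computed on the list side (Lean's String.append is kernel-opaque); exact.
def pyCat (a b : String) : String := String.ofList (a.toList ++ b.toList)

-- the 'while len(result) < k' loop of A; each iteration appends exactly one element to result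
def loopA (k : Int) (result queue : List String) : List String :=
  if (result.length : Int) < k then
    match queue with
    | [] => result  -- unreachable: the queue is never empty when this loop runs (popleft would raise)
    | c :: rest => loopA k (result ++ [c]) (rest ++ [pyCat c "0", pyCat c "1"])
  else result
termination_by (k - result.length).toNat
decreasing_by simp; omega

def first_k_binary (k : Int) : List String :=
  if k ≤ 0 then [] else loopA k ["0"] ["1"]

-- ===== PORT B =====
-- bin(n)[2:] for n ≥ 0, as a list of chars (exact: binary digits, no leading zeros, bin(0)[2:] = "0")
def binChars (n : Nat) : List Char :=
  if n < 2 then [Char.ofNat (48 + n)]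
  else binChars (n / 2) ++ [Char.ofNat (48 + n % 2)]
decreasing_by omega

-- [bin(i)[2:] for i in range(k)]  (range(k) is 0..k-1, empty for k ≤ 0, i.e. List.range k.toNat)
def first_k_binary_alt (k : Int) : List String :=
  (List.range k.toNat).map (fun i => String.ofList (binChars i))

-- ===== PRECONDITION & SPEC =====
def Spec_first_k_binary (k : Int) (out : List String) : Prop := out = first_k_binary_alt k
instance (k : Int) (out : List String) : Decidable (Spec_first_k_binary k out) := by unfold Spec_first_k_binary; infer_instance

-- ===== CLAIM (what is proved, stated in full; the proofs are below) =====
def Claim_equal_first_k_binary : Prop := ∀ (k : Int), Dom_first_k_binary k → Spec_first_k_binary k (first_k_binary k)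

-- ===== LEMMAS AND PROOFS =====

lemma binChars_two_mul (n : Nat) (h : 1 ≤ n) : binChars (2 * n) = binChars n ++ ['0'] := by
  rw [binChars]
  have h1 : ¬ (2 * n < 2) := by omega
  have h2 : 2 * n / 2 = n := by omega
  have h3 : 2 * n % 2 = 0 := by omega
  simp [h1, h2, h3]

lemma binChars_two_mul_add_one (n : Nat) (h : 1 ≤ n) :
    binChars (2 * n + 1) = binChars n ++ ['1'] := by
  rw [binChars]
  have h1 : ¬ (2 * n + 1 < 2) := by omega
  have h2 : (2 * n + 1) / 2 = n := by omega
  have h3 : (2 * n + 1) % 2 = 1 := by omega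
  simp [h1, h2, h3]

lemma pyCat_bin_zero (n : Nat) (h : 1 ≤ n) :
    pyCat (String.ofList (binChars n)) "0" = String.ofList (binChars (2 * n)) := by
  simp [pyCat, binChars_two_mul n h]

lemma pyCat_bin_one (n : Nat) (h : 1 ≤ n) :
    pyCat (String.ofList (binChars n)) "1" = String.ofList (binChars (2 * n + 1)) := by
  simp [pyCat, binChars_two_mul_add_one n h]

-- loop invariant: with r = |result|, result holds bin(0..r-1) and the queue holds bin(r..2r-1)
lemma loopA_inv (m : Nat) : ∀ (k : Int) (r : Nat), 1 ≤ r → k.toNat ≤ r + m →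
    loopA k ((List.range r).map (fun n => String.ofList (binChars n)))
            ((List.range' r r).map (fun n => String.ofList (binChars n)))
      = (List.range (max r k.toNat)).map (fun n => String.ofList (binChars n)) := by
  induction m with
  | zero =>
    intro k r hr hm
    rw [loopA.eq_def]
    have hlt : ¬ ((((List.range r).map (fun n => String.ofList (binChars n))).length : Int) < k) := by
      simp; omega
    rw [if_neg hlt]
    have : max r k.toNat = r := by omega
    rw [this]
  | succ m ih =>
    intro k r hr hm
    rw [loopA.eq_def]
    by_cases hlt : (((List.range r).map (fun n => String.ofList (binChars n))).length : Int) < k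
    · rw [if_pos hlt]
      have hrk : r < k.toNat := by simp at hlt; omega
      have hq : List.range' r r = r :: List.range' (r + 1) (r - 1) := by
        cases r with
        | zero => omega
        | succ s => simp [List.range'_succ]
      rw [hq]
      simp only [List.map_cons]
      have hres : (List.range r).map (fun n => String.ofList (binChars n))
            ++ [String.ofList (binChars r)]
          = (List.range (r + 1)).map (fun n => String.ofList (binChars n)) := by
        rw [List.range_succ]; simp
      have hq2 : List.range' (r + 1) (r - 1) ++ [2 * r, 2 * r + 1]
          = List.range' (r + 1) (r + 1) := by
        have e1 : List.range' (r + 1) r = List.range' (r + 1) (r - 1) ++ [2 * r] := by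
          have : r = (r - 1) + 1 := by omega
          rw [this, List.range'_concat]
          congr 1
          congr 1; omega
        rw [List.range'_concat]
        rw [e1]
        simp; omega
      have hqueue : (List.range' (r + 1) (r - 1)).map (fun n => String.ofList (binChars n))
            ++ [pyCat (String.ofList (binChars r)) "0", pyCat (String.ofList (binChars r)) "1"]
          = (List.range' (r + 1) (r + 1)).map (fun n => String.ofList (binChars n)) := by
        rw [pyCat_bin_zero r hr, pyCat_bin_one r hr, ← hq2]
        simp
      rw [hres, hqueue, ih k (r + 1) (by omega) (by omega)]
      have hmax : max (r + 1) k.toNat = max r k.toNat := by omega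
      rw [hmax]
    · rw [if_neg hlt]
      have : max r k.toNat = r := by simp at hlt; omega
      rw [this]

-- ===== VERDICT (by name: the statement is the Claim_ definition above) =====
theorem first_k_binary_spec : Claim_equal_first_k_binary := by
  intro k _
  unfold Spec_first_k_binary first_k_binary first_k_binary_alt
  by_cases hk : k ≤ 0
  · rw [if_pos hk]
    have : k.toNat = 0 := by omega
    rw [this]; rfl
  · rw [if_neg hk]
    have hb0 : String.ofList (binChars 0) = "0" := by rw [binChars]; rfl
    have hb1 : String.ofList (binChars 1) = "1" := by rw [binChars]; rfl
    have h0 : (["0"] : List String) = (List.range 1).map (fun n => String.ofList (binChars n)) := by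
      rw [show List.range 1 = [0] from rfl]; simp [hb0]
    have h1 : (["1"] : List String) = (List.range' 1 1).map (fun n => String.ofList (binChars n)) := by
      rw [show List.range' 1 1 = [1] from rfl]; simp [hb1]
    rw [h0, h1, loopA_inv k.toNat k 1 (by omega) (by omega)]
    have hmax : max 1 k.toNat = k.toNat := by omega
    rw [hmax]
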